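-- pv_equiv track=rewrite | github.com/ryayoung/toolcall | toolcall/openai_function.py | order_properties
-- ===== SOURCE A (Python) =====
-- from typing import (
--     get_type_hints,
--     Callable,
--     Any,
--     TypeVar,
--     Generic,
--     cast,
--     overload,
--     ClassVar,
--     ParamSpec,
--     TypedDict,
--     Literal,
--     NotRequired,
--     Dict,
-- )
--
-- T = TypeVar("T", bound=Dict | TypedDict)
--
-- def order_properties(items: T, start: list[str], end: list[str] | None = None) -> T:
--     start_dict = {k: items[k] for k in start if k in items}
--
--     if end:
--         end_dict = {k: items[k] for k in end if k in items}
--         rest = {k: items[k] for k in items if k not in start and k not in end}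
--         result = {**start_dict, **rest, **end_dict}
--
--     else:
--         rest = {k: items[k] for k in items if k not in start}
--         result = {**start_dict, **rest}
--
--     return cast(T, result)
-- ===== SOURCE B (Python) =====
-- def order_properties(items, start, end=None):
--     keys = list(items)
--     n, m = len(start), len(items)
--
--     def rank(k):
--         if k in start:
--             return start.index(k)
--         if end and k in end:
--             return n + m + end.index(k)
--         return n + keys.index(k)
--
--     return {k: items[k] for k in sorted(keys, key=rank)}
-- ===== Notes on version B (the rewrite author's own statement) =====
-- stated objective: alternative
-- what changed: Instead of building three partition dicts and merging them, B assigns every key a single integer rank (start position, middle by original position, or end position offset past the other groups) and returns the keys stably sorted by that rank; Pre_ restricts items to association lists with distinct keys, the only lists that represent the Python dict parameter (on a raw list of pairs A itself raises TypeError).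
import Mathlib
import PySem

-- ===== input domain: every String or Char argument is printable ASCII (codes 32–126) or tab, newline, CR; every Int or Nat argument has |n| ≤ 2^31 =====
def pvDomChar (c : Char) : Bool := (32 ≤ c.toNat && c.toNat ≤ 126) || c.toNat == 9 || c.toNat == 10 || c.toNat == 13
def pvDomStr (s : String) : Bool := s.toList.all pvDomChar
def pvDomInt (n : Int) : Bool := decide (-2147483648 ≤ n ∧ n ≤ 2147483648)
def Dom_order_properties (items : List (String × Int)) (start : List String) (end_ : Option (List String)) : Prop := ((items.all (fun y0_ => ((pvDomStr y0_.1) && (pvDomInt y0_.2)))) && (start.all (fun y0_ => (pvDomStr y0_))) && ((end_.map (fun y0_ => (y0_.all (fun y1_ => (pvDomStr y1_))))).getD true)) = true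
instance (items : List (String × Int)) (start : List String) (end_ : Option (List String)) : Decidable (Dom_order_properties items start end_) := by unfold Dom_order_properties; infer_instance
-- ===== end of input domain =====

-- B replaces A's three partition dicts and dict merge by one integer rank per key and a stable sort of the keys by that rank (objective: alternative).

-- ===== PORT A =====
def order_properties (items : List (String × Int)) (start : List String) (end_ : Option (List String)) : List (String × Int) :=
  let d : PySem.Dict String Int := PySem.Dict.mk items
  let start_dict : PySem.Dict String Int :=
    start.foldl (fun acc k => if d.contains k then acc.insert k (d.getD k 0) else acc) PySem.Dict.empty
  match end_ with
  | some e =>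
    if !e.isEmpty then
      let end_dict : PySem.Dict String Int :=
        e.foldl (fun acc k => if d.contains k then acc.insert k (d.getD k 0) else acc) PySem.Dict.empty
      let rest : PySem.Dict String Int :=
        items.foldl (fun acc p => if !(start.contains p.1) && !(e.contains p.1) then acc.insert p.1 (d.getD p.1 0) else acc) PySem.Dict.empty
      let result := end_dict.items.foldl (fun acc p => acc.insert p.1 p.2)
        (rest.items.foldl (fun acc p => acc.insert p.1 p.2)
          (start_dict.items.foldl (fun acc p => acc.insert p.1 p.2) PySem.Dict.empty))
      result.items
    else
      let rest : PySem.Dict String Int :=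
        items.foldl (fun acc p => if !(start.contains p.1) then acc.insert p.1 (d.getD p.1 0) else acc) PySem.Dict.empty
      let result := rest.items.foldl (fun acc p => acc.insert p.1 p.2)
        (start_dict.items.foldl (fun acc p => acc.insert p.1 p.2) PySem.Dict.empty)
      result.items
  | none =>
      let rest : PySem.Dict String Int :=
        items.foldl (fun acc p => if !(start.contains p.1) then acc.insert p.1 (d.getD p.1 0) else acc) PySem.Dict.empty
      let result := rest.items.foldl (fun acc p => acc.insert p.1 p.2)
        (start_dict.items.foldl (fun acc p => acc.insert p.1 p.2) PySem.Dict.empty)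
      result.items

-- ===== PORT B =====
def order_properties_alt (items : List (String × Int)) (start : List String) (end_ : Option (List String)) : List (String × Int) :=
  let d : PySem.Dict String Int := PySem.Dict.mk items
  let keys := items.map Prod.fst
  let n := start.length
  let m := items.length
  let rank : String → Nat := fun k =>
    if start.contains k then (PySem.List.index? start k).getD 0
    else
      match end_ with
      | some e =>
        if !e.isEmpty && e.contains k then n + m + (PySem.List.index? e k).getD 0
        else n + (PySem.List.index? keys k).getD 0
      | none => n + (PySem.List.index? keys k).getD 0
  ((PySem.List.sorted keys rank).foldl (fun acc k => acc.insert k (d.getD k 0)) PySem.Dict.empty).items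

-- ===== PRECONDITION & SPEC =====
-- Pre_ restricts items to association lists with pairwise-distinct keys — the only lists that
-- represent the Python dict parameter (on a raw list of pairs A itself raises TypeError).
def Pre_order_properties (items : List (String × Int)) (start : List String) (end_ : Option (List String)) : Prop :=
  (items.map Prod.fst).Nodup
instance (items : List (String × Int)) (start : List String) (end_ : Option (List String)) : Decidable (Pre_order_properties items start end_) := by unfold Pre_order_properties; infer_instance
def pvWitness_order_properties : (List (String × Int)) × List String × Option (List String) :=
  ([("a", 1), ("b", 2), ("c", 3)], ["b"], some ["a"])
def Spec_order_properties (items : List (String × Int)) (start : List String) (end_ : Option (List String)) (out : List (String × Int)) : Prop := out = order_properties_alt items start end_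
instance (items : List (String × Int)) (start : List String) (end_ : Option (List String)) (out : List (String × Int)) : Decidable (Spec_order_properties items start end_ out) := by unfold Spec_order_properties; infer_instance

-- ===== CLAIM (what is proved, stated in full; the proofs are below) =====
def Claim_equal_order_properties : Prop := ∀ (items : List (String × Int)) (start : List String) (end_ : Option (List String)), Dom_order_properties items start end_ → Pre_order_properties items start end_ → Spec_order_properties items start end_ (order_properties items start end_)

-- ===== LEMMAS AND PROOFS =====

-- `k in items` for the dict built from the association list is membership among the keys
theorem pv_contains_mk_iff (items : List (String × Int)) (k : String) :
    (PySem.Dict.mk items).contains k = true ↔ k ∈ items.map Prod.fst := by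
  simp [PySem.Dict.contains, List.any_eq_true]

-- value after a fold of key-determined inserts
theorem pv_getD_foldl_insert_const (f : String → Int) (l : List String) (d : PySem.Dict String Int) (k : String) :
    (l.foldl (fun a x => a.insert x (f x)) d).getD k 0 = if k ∈ l then f k else d.getD k 0 := by
  induction l generalizing d with
  | nil => simp
  | cons x t ih =>
    simp only [List.foldl_cons, ih, PySem.Dict.getD_insert, List.mem_cons]
    by_cases hkt : k ∈ t <;> by_cases hkx : k = x <;> simp [hkt, hkx]

-- items after a fold of key-determined inserts from the empty dict
theorem pv_items_foldl_insert_const (f : String → Int) (l : List String) :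
    (l.foldl (fun a x => a.insert x (f x)) (PySem.Dict.empty : PySem.Dict String Int)).items
      = (PySem.Set.ofList l).map (fun k => (k, f k)) := by
  have hkeys : (l.foldl (fun a x => a.insert x (f x)) (PySem.Dict.empty : PySem.Dict String Int)).keys
      = PySem.Set.ofList l := by
    have := PySem.Dict.keys_foldl_insert (ν := Int) l (fun _ x => f x) PySem.Dict.empty
    simpa [PySem.Set.update, PySem.Set.ofList, PySem.Dict.keys, PySem.Dict.empty] using this
  have hnd : (l.foldl (fun a x => a.insert x (f x)) (PySem.Dict.empty : PySem.Dict String Int)).keys.Nodup :=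
    PySem.Dict.nodup_keys_foldl_insert (ν := Int) l (fun _ x => f x) PySem.Dict.empty
      (by simp [PySem.Dict.keys, PySem.Dict.empty])
  rw [PySem.Dict.items_eq_map_keys _ hnd 0, hkeys]
  apply List.map_congr_left
  intro k hk
  rw [pv_getD_foldl_insert_const]
  simp [(PySem.Set.mem_ofList l k).mp hk]

-- first-occurrence order of a filtered list is first-index order in the original list
theorem pv_pairwise_idxOf_ofList_filter (p : String → Bool) (l : List String) :
    (PySem.Set.ofList (l.filter p) : List String).Pairwise (fun a b => l.idxOf a < l.idxOf b) := by
  induction l with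
  | nil => simp [PySem.Set.ofList, PySem.Set.empty]
  | cons x t ih =>
    by_cases hp : p x = true
    · rw [List.filter_cons_of_pos hp, PySem.Set.ofList_cons]
      have hsub : ((PySem.Set.ofList (t.filter p)).discard x : List String).Sublist
          (PySem.Set.ofList (t.filter p) : List String) := by
        unfold PySem.Set.discard
        exact List.filter_sublist
      have h1 := List.Pairwise.sublist hsub ih
      constructor
      · intro b hb
        have h' : (b ∈ t ∧ p b = true) ∧ ¬ b = x := by simpa [PySem.Set.discard] using hb
        rw [List.idxOf_cons_self, List.idxOf_cons_ne _ (Ne.symm h'.2)]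
        exact Nat.succ_pos _
      · refine h1.imp_of_mem ?_
        intro a b ha hb hab
        have ha' : (a ∈ t ∧ p a = true) ∧ ¬ a = x := by simpa [PySem.Set.discard] using ha
        have hb' : (b ∈ t ∧ p b = true) ∧ ¬ b = x := by simpa [PySem.Set.discard] using hb
        rw [List.idxOf_cons_ne _ (Ne.symm ha'.2), List.idxOf_cons_ne _ (Ne.symm hb'.2)]
        omega
    · rw [List.filter_cons_of_neg hp]
      refine ih.imp_of_mem ?_
      intro a b ha hb hab
      have hpa : p a = true := List.of_mem_filter ((PySem.Set.mem_ofList _ _).mp ha)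
      have hpb : p b = true := List.of_mem_filter ((PySem.Set.mem_ofList _ _).mp hb)
      have hax : a ≠ x := fun h => by rw [h] at hpa; exact hp hpa
      have hbx : b ≠ x := fun h => by rw [h] at hpb; exact hp hpb
      rw [List.idxOf_cons_ne _ (Ne.symm hax), List.idxOf_cons_ne _ (Ne.symm hbx)]
      omega

-- list.index of a present element
theorem pv_index?_getD (l : List String) (k : String) (h : k ∈ l) :
    (PySem.List.index? l k).getD 0 = List.idxOf k l := by
  rw [PySem.List.index?_eq_idxOf?]
  have hs : (List.idxOf? k l).isSome := by
    have := (PySem.List.index?_isSome_iff l k).mpr h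
    rwa [PySem.List.index?_eq_idxOf?] at this
  rcases ho : List.idxOf? k l with _ | x
  · rw [ho] at hs; simp at hs
  · have hd := List.idxOf_eq_getD_idxOf? k l
    rw [ho] at hd
    simp [hd]

-- the three key groups of the result, and B's rank
def pvKey (items : List (String × Int)) : String → String × Int :=
  fun k => (k, (PySem.Dict.mk items).getD k 0)
def pvSk (items : List (String × Int)) (start : List String) : List String :=
  PySem.Set.ofList (start.filter (fun k => (PySem.Dict.mk items).contains k))
def pvRk (items : List (String × Int)) (start el : List String) : List String :=
  PySem.Set.ofList ((items.map Prod.fst).filter (fun k => !start.contains k && !el.contains k))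
def pvEkFull (items : List (String × Int)) (el : List String) : List String :=
  PySem.Set.ofList (el.filter (fun k => (PySem.Dict.mk items).contains k))
def pvEk (items : List (String × Int)) (start el : List String) : List String :=
  (pvEkFull items el).filter (fun k => !start.contains k)
def pvRank (items : List (String × Int)) (start el : List String) : String → Nat :=
  fun k =>
    if start.contains k then (PySem.List.index? start k).getD 0
    else if !el.isEmpty && el.contains k then start.length + items.length + (PySem.List.index? el k).getD 0
    else start.length + (PySem.List.index? (items.map Prod.fst) k).getD 0

theorem pv_mem_Sk (items : List (String × Int)) (start : List String) (k : String) :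
    k ∈ pvSk items start ↔ k ∈ start ∧ k ∈ items.map Prod.fst := by
  simp [pvSk, PySem.Dict.contains, List.any_eq_true]

theorem pv_mem_Rk (items : List (String × Int)) (start el : List String) (k : String) :
    k ∈ pvRk items start el ↔ k ∈ items.map Prod.fst ∧ k ∉ start ∧ k ∉ el := by
  simp [pvRk, List.mem_filter]

theorem pv_mem_Ek (items : List (String × Int)) (start el : List String) (k : String) :
    k ∈ pvEk items start el ↔ k ∈ el ∧ k ∈ items.map Prod.fst ∧ k ∉ start := by
  simp [pvEk, pvEkFull, List.mem_filter, and_assoc]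

theorem pv_rank_Sk (items : List (String × Int)) (start el : List String) (k : String)
    (hk : k ∈ pvSk items start) :
    pvRank items start el k = List.idxOf k start ∧ List.idxOf k start < start.length := by
  have h := (pv_mem_Sk items start k).mp hk
  have hc : start.contains k = true := List.contains_iff_mem.mpr h.1
  constructor
  · unfold pvRank
    rw [if_pos hc]
    exact pv_index?_getD start k h.1
  · exact List.idxOf_lt_length_of_mem h.1

theorem pv_rank_Rk (items : List (String × Int)) (start el : List String) (k : String)
    (hk : k ∈ pvRk items start el) :
    pvRank items start el k = start.length + List.idxOf k (items.map Prod.fst)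
      ∧ List.idxOf k (items.map Prod.fst) < items.length := by
  have h := (pv_mem_Rk items start el k).mp hk
  have hs : start.contains k = false := by
    simpa using fun hm => h.2.1 (List.contains_iff_mem.mp hm)
  have he : el.contains k = false := by
    simpa using fun hm => h.2.2 (List.contains_iff_mem.mp hm)
  constructor
  · unfold pvRank
    rw [if_neg (by simpa using h.2.1), if_neg (by simp; exact fun _ => h.2.2)]
    rw [pv_index?_getD _ k h.1]
  · have := List.idxOf_lt_length_of_mem h.1
    simpa using this

theorem pv_rank_Ek (items : List (String × Int)) (start el : List String) (k : String)
    (hk : k ∈ pvEk items start el) :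
    pvRank items start el k = start.length + items.length + List.idxOf k el := by
  have h := (pv_mem_Ek items start el k).mp hk
  have hs : start.contains k = false := by
    simpa using fun hm => h.2.2 (List.contains_iff_mem.mp hm)
  have he : el.contains k = true := List.contains_iff_mem.mpr h.1
  have hne : el.isEmpty = false := by
    cases el with
    | nil => exact absurd h.1 (by simp)
    | cons a t => rfl
  unfold pvRank
  rw [if_neg (by simpa using h.2.2), if_pos (by simp; exact ⟨List.ne_nil_of_mem h.1, h.1⟩), pv_index?_getD el k h.1]

-- the stable sort by rank produces exactly start-group ++ middle ++ end-group
theorem pv_sorted_eq (items : List (String × Int)) (start el : List String)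
    (hnd : (items.map Prod.fst).Nodup) :
    PySem.List.sorted (items.map Prod.fst) (pvRank items start el)
      = (pvSk items start ++ pvRk items start el) ++ pvEk items start el := by
  apply PySem.List.sorted_eq_of_perm_of_pairwise_lt
  · -- the three groups are a permutation of the keys
    have hndS : (pvSk items start).Nodup := by unfold pvSk; exact PySem.Set.nodup_ofList _
    have hndR : (pvRk items start el).Nodup := by unfold pvRk; exact PySem.Set.nodup_ofList _
    have hndE : (pvEk items start el).Nodup := by
      unfold pvEk
      exact List.Nodup.filter _ (by unfold pvEkFull; exact PySem.Set.nodup_ofList _)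
    have hndys : ((pvSk items start ++ pvRk items start el) ++ pvEk items start el).Nodup := by
      rw [List.nodup_append, List.nodup_append]
      refine ⟨⟨hndS, hndR, ?_⟩, hndE, ?_⟩
      · intro a ha b hb hab
        subst hab
        exact ((pv_mem_Rk _ _ _ _).mp hb).2.1 ((pv_mem_Sk _ _ _).mp ha).1
      · intro a ha b hb hab
        subst hab
        rcases List.mem_append.mp ha with h | h
        · exact ((pv_mem_Ek _ _ _ _).mp hb).2.2 ((pv_mem_Sk _ _ _).mp h).1
        · exact ((pv_mem_Rk _ _ _ _).mp h).2.2 ((pv_mem_Ek _ _ _ _).mp hb).1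
    rw [List.perm_ext_iff_of_nodup hndys hnd]
    intro k
    simp only [List.mem_append, pv_mem_Sk, pv_mem_Rk, pv_mem_Ek]
    constructor
    · rintro ((⟨_, h⟩ | ⟨h, _⟩) | ⟨_, h, _⟩) <;> exact h
    · intro hkeys
      by_cases hks : k ∈ start
      · exact Or.inl (Or.inl ⟨hks, hkeys⟩)
      · by_cases hke : k ∈ el
        · exact Or.inr ⟨hke, hkeys, hks⟩
        · exact Or.inl (Or.inr ⟨hkeys, hks, hke⟩)
  · -- ranks strictly increase along the three groups
    rw [List.pairwise_append, List.pairwise_append]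
    have hpwS : (pvSk items start).Pairwise
        (fun a b => pvRank items start el a < pvRank items start el b) := by
      have h := pv_pairwise_idxOf_ofList_filter
        (fun k => (PySem.Dict.mk items).contains k) start
      refine List.Pairwise.imp_of_mem ?_ h
      intro a b ha hb hab
      rw [(pv_rank_Sk items start el a ha).1, (pv_rank_Sk items start el b hb).1]
      exact hab
    have hpwR : (pvRk items start el).Pairwise
        (fun a b => pvRank items start el a < pvRank items start el b) := by
      have h := pv_pairwise_idxOf_ofList_filter
        (fun k => !start.contains k && !el.contains k) (items.map Prod.fst)
      refine List.Pairwise.imp_of_mem ?_ h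
      intro a b ha hb hab
      rw [(pv_rank_Rk items start el a ha).1, (pv_rank_Rk items start el b hb).1]
      omega
    have hpwE : (pvEk items start el).Pairwise
        (fun a b => pvRank items start el a < pvRank items start el b) := by
      have h := pv_pairwise_idxOf_ofList_filter
        (fun k => (PySem.Dict.mk items).contains k) el
      have h2 : (pvEk items start el).Pairwise (fun a b => el.idxOf a < el.idxOf b) :=
        List.Pairwise.sublist (by unfold pvEk; exact List.filter_sublist) h
      refine List.Pairwise.imp_of_mem ?_ h2
      intro a b ha hb hab
      rw [pv_rank_Ek items start el a ha, pv_rank_Ek items start el b hb]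
      omega
    refine ⟨⟨hpwS, hpwR, ?_⟩, hpwE, ?_⟩
    · intro a ha b hb
      have h1 := pv_rank_Sk items start el a ha
      have h2 := (pv_rank_Rk items start el b hb).1
      omega
    · intro a ha b hb
      have h3 := pv_rank_Ek items start el b hb
      rcases List.mem_append.mp ha with h | h
      · have h1 := pv_rank_Sk items start el a h
        omega
      · have h2 := pv_rank_Rk items start el a h
        omega

-- A-side evaluations
theorem pv_partition_items (items : List (String × Int)) (l : List String) :
    (l.foldl (fun acc k => if (PySem.Dict.mk items).contains k then acc.insert k ((PySem.Dict.mk items).getD k 0) else acc) PySem.Dict.empty).items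
      = (PySem.Set.ofList (l.filter (fun k => (PySem.Dict.mk items).contains k)) : List String).map (pvKey items) := by
  rw [PySem.List.foldl_if_eq_foldl_filter]
  exact pv_items_foldl_insert_const _ _

theorem pv_rest_items (items : List (String × Int)) (q : String → Bool) :
    (items.foldl (fun acc p => if q p.1 then acc.insert p.1 ((PySem.Dict.mk items).getD p.1 0) else acc) PySem.Dict.empty).items
      = (PySem.Set.ofList ((items.map Prod.fst).filter q) : List String).map (pvKey items) := by
  have h1 : items.foldl (fun acc p => if q p.1 then acc.insert p.1 ((PySem.Dict.mk items).getD p.1 0) else acc) (PySem.Dict.empty : PySem.Dict String Int)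
      = (items.map Prod.fst).foldl (fun acc k => if q k then acc.insert k ((PySem.Dict.mk items).getD k 0) else acc) PySem.Dict.empty :=
    (List.foldl_map (f := Prod.fst)
      (g := fun acc k => if q k then acc.insert k ((PySem.Dict.mk items).getD k 0) else acc)
      (l := items) (init := PySem.Dict.empty)).symm
  rw [h1, PySem.List.foldl_if_eq_foldl_filter]
  exact pv_items_foldl_insert_const _ _

theorem pv_merge_items (items : List (String × Int)) (ks : List String) (d0 : PySem.Dict String Int) :
    (ks.map (pvKey items)).foldl (fun acc p => acc.insert p.1 p.2) d0
      = ks.foldl (fun acc k => acc.insert k ((PySem.Dict.mk items).getD k 0)) d0 := by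
  rw [List.foldl_map]
  rfl

theorem pv_ofList_triple (items : List (String × Int)) (start el : List String) :
    (PySem.Set.ofList ((pvSk items start ++ pvRk items start el) ++ pvEkFull items el) : List String)
      = (pvSk items start ++ pvRk items start el) ++ pvEk items start el := by
  have hS : (PySem.Set.ofList (pvSk items start) : List String) = pvSk items start :=
    PySem.Set.ofList_eq_self_of_nodup _ (by unfold pvSk; exact PySem.Set.nodup_ofList _)
  have hR : (PySem.Set.ofList (pvRk items start el) : List String) = pvRk items start el :=
    PySem.Set.ofList_eq_self_of_nodup _ (by unfold pvRk; exact PySem.Set.nodup_ofList _)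
  have hE : (PySem.Set.ofList (pvEkFull items el) : List String) = pvEkFull items el :=
    PySem.Set.ofList_eq_self_of_nodup _ (by unfold pvEkFull; exact PySem.Set.nodup_ofList _)
  have h12 : (PySem.Set.ofList (pvSk items start ++ pvRk items start el) : List String)
      = pvSk items start ++ pvRk items start el := by
    rw [PySem.Set.ofList_append, PySem.Set.update_eq_append_filter, hS, hR]
    congr 1
    apply List.filter_eq_self.mpr
    intro k hk
    have h := (pv_mem_Rk items start el k).mp hk
    simp [pv_mem_Sk]
    intro hks
    exact absurd hks h.2.1
  rw [PySem.Set.ofList_append, PySem.Set.update_eq_append_filter, h12, hE]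
  congr 1
  have hc : ∀ k ∈ pvEkFull items el,
      ((pvSk items start ++ pvRk items start el).contains k) = start.contains k := by
    intro k hk
    have hkel : k ∈ el ∧ k ∈ items.map Prod.fst := by
      have h' := hk
      unfold pvEkFull at h'
      simpa [List.mem_filter, pv_contains_mk_iff] using h'
    by_cases hks : k ∈ start
    · simp [pv_mem_Sk, hks, hkel.2]
    · have h1 : k ∉ pvSk items start := fun h => hks ((pv_mem_Sk _ _ _).mp h).1
      have h2 : k ∉ pvRk items start el := fun h => ((pv_mem_Rk _ _ _ _).mp h).2.2 hkel.1
      simp [hks, h1, h2]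
  calc List.filter (fun y => !(pvSk items start ++ pvRk items start el).contains y) (pvEkFull items el)
      = List.filter (fun y => !start.contains y) (pvEkFull items el) :=
        List.filter_congr (fun k hk => by rw [hc k hk])
    _ = pvEk items start el := rfl

theorem pv_triple_items (items : List (String × Int)) (start el : List String) :
    (((pvEkFull items el).map (pvKey items)).foldl (fun acc p => acc.insert p.1 p.2)
      (((pvRk items start el).map (pvKey items)).foldl (fun acc p => acc.insert p.1 p.2)
        (((pvSk items start).map (pvKey items)).foldl (fun acc p => acc.insert p.1 p.2)
          (PySem.Dict.empty : PySem.Dict String Int)))).items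
      = ((pvSk items start ++ pvRk items start el) ++ pvEk items start el).map (pvKey items) := by
  rw [pv_merge_items, pv_merge_items, pv_merge_items,
      ← List.foldl_append, ← List.foldl_append]
  rw [pv_items_foldl_insert_const]
  rw [show pvSk items start ++ (pvRk items start el ++ pvEkFull items el)
        = (pvSk items start ++ pvRk items start el) ++ pvEkFull items el from
      (List.append_assoc _ _ _).symm]
  rw [pv_ofList_triple]
  rfl

-- B-side evaluation
theorem pv_B_eval (items : List (String × Int)) (start el : List String)
    (hnd : (items.map Prod.fst).Nodup) :
    ((PySem.List.sorted (items.map Prod.fst) (pvRank items start el)).foldl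
        (fun acc k => acc.insert k ((PySem.Dict.mk items).getD k 0)) PySem.Dict.empty).items
      = ((pvSk items start ++ pvRk items start el) ++ pvEk items start el).map (pvKey items) := by
  rw [pv_items_foldl_insert_const]
  have hnd' : (PySem.List.sorted (items.map Prod.fst) (pvRank items start el)).Nodup :=
    ((PySem.List.sorted_perm (items.map Prod.fst) (pvRank items start el) false).nodup_iff).mpr hnd
  rw [PySem.Set.ofList_eq_self_of_nodup _ hnd', pv_sorted_eq items start el hnd]
  rfl

-- ===== VERDICT (by name: the statement is the Claim_ definition above) =====
theorem order_properties_spec : Claim_equal_order_properties := by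
  intro items start end_ _hdom hpre
  unfold Spec_order_properties
  unfold order_properties order_properties_alt
  cases end_ with
  | none =>
    dsimp only
    rw [pv_partition_items items start,
        pv_rest_items items (fun k => !start.contains k),
        List.filter_congr (l := items.map Prod.fst)
          (p := fun k => !start.contains k)
          (q := fun k => !start.contains k && !(([] : List String).contains k))
          (fun k _ => by simp)]
    exact (pv_triple_items items start []).trans (pv_B_eval items start [] hpre).symm
  | some e =>
    by_cases he : e.isEmpty = true
    · have he' : e = [] := List.isEmpty_iff.mp he
      subst he'
      dsimp only
      rw [pv_partition_items items start,
          pv_rest_items items (fun k => !start.contains k),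
          List.filter_congr (l := items.map Prod.fst)
            (p := fun k => !start.contains k)
            (q := fun k => !start.contains k && !(([] : List String).contains k))
            (fun k _ => by simp)]
      exact (pv_triple_items items start []).trans (pv_B_eval items start [] hpre).symm
    · have he2 : e.isEmpty = false := by simpa using he
      dsimp only
      rw [if_pos (by rw [he2]; rfl : (!e.isEmpty) = true)]
      rw [pv_partition_items items start, pv_partition_items items e,
          pv_rest_items items (fun k => !start.contains k && !e.contains k)]
      exact (pv_triple_items items start e).trans (pv_B_eval items start e hpre).symm
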